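-- pv_equiv track=rewrite | github.com/Zaphenath103/zaphscore-engine | app/engine/license_scanner.py | _classify_dep_license_risk
-- ===== SOURCE A (Python) =====
-- def _normalise_spdx(raw: str) -> str:
--     """Normalise a license identifier to a clean SPDX-like form."""
--     s = raw.strip()
--     # Handle SPDX expressions: "MIT OR Apache-2.0" → take the first
--     if " OR " in s.upper():
--         s = s.split(" OR ")[0].strip()
--     if " AND " in s.upper():
--         s = s.split(" AND ")[0].strip()
--     # Handle parenthesised expressions
--     s = s.strip("()")
--     return s
--
-- CLEAR_LICENSES: set[str] = {
--     "MIT", "Apache-2.0", "BSD-2-Clause", "BSD-3-Clause", "ISC",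
--     "Unlicense", "0BSD", "CC0-1.0", "Zlib", "BSL-1.0", "PSF-2.0",
--     "Python-2.0", "BlueOak-1.0.0", "CC-BY-4.0", "CC-BY-3.0",
--     "WTFPL",
-- }
--
-- CAUTION_LICENSES: set[str] = {
--     "MPL-2.0", "LGPL-2.1", "LGPL-2.1-only", "LGPL-2.1-or-later",
--     "LGPL-3.0", "LGPL-3.0-only", "LGPL-3.0-or-later", "EUPL-1.2",
--     "CPAL-1.0", "EPL-1.0", "EPL-2.0", "OSL-3.0",
-- }
--
-- RESTRICTED_LICENSES: set[str] = {
--     "GPL-2.0", "GPL-2.0-only", "GPL-2.0-or-later",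
--     "GPL-3.0", "GPL-3.0-only", "GPL-3.0-or-later",
--     "AGPL-3.0", "AGPL-3.0-only", "AGPL-3.0-or-later",
--     "SSPL-1.0", "CC-BY-SA-4.0",
-- }
--
-- def _classify_dep_license_risk(spdx: str) -> str:
--     """Classify a dependency license into a risk level.
--
--     Returns one of: ``"clear"``, ``"caution"``, ``"restricted"``,
--     ``"unknown"``.
--     """
--     normalised = _normalise_spdx(spdx)
--     upper = normalised.upper()
--
--     # Check exact match first, then case-insensitive
--     if normalised in CLEAR_LICENSES:
--         return "clear"
--     for lic in CLEAR_LICENSES: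
--         if lic.upper() == upper:
--             return "clear"
--
--     if normalised in CAUTION_LICENSES:
--         return "caution"
--     for lic in CAUTION_LICENSES:
--         if lic.upper() == upper:
--             return "caution"
--
--     if normalised in RESTRICTED_LICENSES:
--         return "restricted"
--     for lic in RESTRICTED_LICENSES:
--         if lic.upper() == upper:
--             return "restricted"
--
--     return "unknown"
-- ===== SOURCE B (Python) =====
-- # One flat (UPPERCASE id, risk) table built as literal data, looked up once.
-- _RISK_TABLE = (
--     ("GPL-2.0", "restricted"), ("GPL-2.0-ONLY", "restricted"),
--     ("GPL-2.0-OR-LATER", "restricted"), ("GPL-3.0", "restricted"),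
--     ("GPL-3.0-ONLY", "restricted"), ("GPL-3.0-OR-LATER", "restricted"),
--     ("AGPL-3.0", "restricted"), ("AGPL-3.0-ONLY", "restricted"),
--     ("AGPL-3.0-OR-LATER", "restricted"), ("SSPL-1.0", "restricted"),
--     ("CC-BY-SA-4.0", "restricted"),
--     ("MPL-2.0", "caution"), ("LGPL-2.1", "caution"),
--     ("LGPL-2.1-ONLY", "caution"), ("LGPL-2.1-OR-LATER", "caution"),
--     ("LGPL-3.0", "caution"), ("LGPL-3.0-ONLY", "caution"),
--     ("LGPL-3.0-OR-LATER", "caution"), ("EUPL-1.2", "caution"),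
--     ("CPAL-1.0", "caution"), ("EPL-1.0", "caution"),
--     ("EPL-2.0", "caution"), ("OSL-3.0", "caution"),
--     ("MIT", "clear"), ("APACHE-2.0", "clear"), ("BSD-2-CLAUSE", "clear"),
--     ("BSD-3-CLAUSE", "clear"), ("ISC", "clear"), ("UNLICENSE", "clear"),
--     ("0BSD", "clear"), ("CC0-1.0", "clear"), ("ZLIB", "clear"),
--     ("BSL-1.0", "clear"), ("PSF-2.0", "clear"), ("PYTHON-2.0", "clear"),
--     ("BLUEOAK-1.0.0", "clear"), ("CC-BY-4.0", "clear"),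
--     ("CC-BY-3.0", "clear"), ("WTFPL", "clear"),
-- )
-- _RISK_MAP = dict(_RISK_TABLE)
--
--
-- def _classify_dep_license_risk(spdx: str) -> str:
--     """Classify a dependency license into a risk level."""
--     s = spdx.strip()
--     for sep in (" OR ", " AND "):   # keep the first clause of an SPDX expression
--         if sep in s.upper():
--             s = s.split(sep)[0].strip()
--     return _RISK_MAP.get(s.strip("()").upper(), "unknown")
-- ===== Notes on version B (the rewrite author's own statement) =====
-- stated objective: simpler
-- what changed: The three license sets, three exact-membership tests and three case-insensitive scan loops are replaced by one flat literal table of (UPPERCASE id, risk) pairs turned into a dict looked up once with a default, with normalisation folded into the classifier as a loop over the two separators.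
import Mathlib
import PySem

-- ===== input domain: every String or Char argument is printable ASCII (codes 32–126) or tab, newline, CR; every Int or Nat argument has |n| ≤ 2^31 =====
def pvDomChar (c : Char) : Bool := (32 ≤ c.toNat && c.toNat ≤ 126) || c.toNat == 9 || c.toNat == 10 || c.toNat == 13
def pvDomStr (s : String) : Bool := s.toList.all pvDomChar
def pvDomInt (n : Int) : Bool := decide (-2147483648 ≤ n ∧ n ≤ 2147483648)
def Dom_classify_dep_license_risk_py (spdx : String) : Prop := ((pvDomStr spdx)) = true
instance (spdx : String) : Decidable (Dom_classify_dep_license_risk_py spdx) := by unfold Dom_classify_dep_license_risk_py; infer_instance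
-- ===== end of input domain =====

-- B replaces the three license sets, three exact-membership tests and three
-- case-insensitive scan loops by one flat literal (UPPERCASE id, risk) table
-- made into a dict and looked up once (objective: simpler).

-- ===== PORT A =====
-- _normalise_spdx, helper of A
def pvNormalise (raw : String) : String :=
  let s := PySem.Str.strip raw
  let s := if PySem.Str.isIn " OR " (PySem.Str.upper s)
           then PySem.Str.strip ((((PySem.Str.split? s " OR ").getD []).headD ""))
           else s
  let s := if PySem.Str.isIn " AND " (PySem.Str.upper s)
           then PySem.Str.strip ((((PySem.Str.split? s " AND ").getD []).headD ""))
           else s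
  PySem.Str.stripChars s "()"

def pvClear : List String :=
  ["MIT", "Apache-2.0", "BSD-2-Clause", "BSD-3-Clause", "ISC",
   "Unlicense", "0BSD", "CC0-1.0", "Zlib", "BSL-1.0", "PSF-2.0",
   "Python-2.0", "BlueOak-1.0.0", "CC-BY-4.0", "CC-BY-3.0", "WTFPL"]

def pvCaution : List String :=
  ["MPL-2.0", "LGPL-2.1", "LGPL-2.1-only", "LGPL-2.1-or-later",
   "LGPL-3.0", "LGPL-3.0-only", "LGPL-3.0-or-later", "EUPL-1.2",
   "CPAL-1.0", "EPL-1.0", "EPL-2.0", "OSL-3.0"]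

def pvRestricted : List String :=
  ["GPL-2.0", "GPL-2.0-only", "GPL-2.0-or-later",
   "GPL-3.0", "GPL-3.0-only", "GPL-3.0-or-later",
   "AGPL-3.0", "AGPL-3.0-only", "AGPL-3.0-or-later",
   "SSPL-1.0", "CC-BY-SA-4.0"]

-- the 'for lic in SET: if lic.upper() == upper: return …' loops become List.any
def classify_dep_license_risk_py (spdx : String) : String :=
  let normalised := pvNormalise spdx
  let upper := PySem.Str.upper normalised
  if pvClear.contains normalised then "clear"
  else if pvClear.any (fun lic => PySem.Str.upper lic == upper) then "clear"
  else if pvCaution.contains normalised then "caution"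
  else if pvCaution.any (fun lic => PySem.Str.upper lic == upper) then "caution"
  else if pvRestricted.contains normalised then "restricted"
  else if pvRestricted.any (fun lic => PySem.Str.upper lic == upper) then "restricted"
  else "unknown"

-- ===== PORT B =====
-- _RISK_TABLE: flat literal data, uppercase SPDX id ↦ risk
def pvRiskTable : List (String × String) :=
  [("GPL-2.0", "restricted"), ("GPL-2.0-ONLY", "restricted"),
   ("GPL-2.0-OR-LATER", "restricted"), ("GPL-3.0", "restricted"),
   ("GPL-3.0-ONLY", "restricted"), ("GPL-3.0-OR-LATER", "restricted"),
   ("AGPL-3.0", "restricted"), ("AGPL-3.0-ONLY", "restricted"),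
   ("AGPL-3.0-OR-LATER", "restricted"), ("SSPL-1.0", "restricted"),
   ("CC-BY-SA-4.0", "restricted"),
   ("MPL-2.0", "caution"), ("LGPL-2.1", "caution"),
   ("LGPL-2.1-ONLY", "caution"), ("LGPL-2.1-OR-LATER", "caution"),
   ("LGPL-3.0", "caution"), ("LGPL-3.0-ONLY", "caution"),
   ("LGPL-3.0-OR-LATER", "caution"), ("EUPL-1.2", "caution"),
   ("CPAL-1.0", "caution"), ("EPL-1.0", "caution"),
   ("EPL-2.0", "caution"), ("OSL-3.0", "caution"),
   ("MIT", "clear"), ("APACHE-2.0", "clear"), ("BSD-2-CLAUSE", "clear"),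
   ("BSD-3-CLAUSE", "clear"), ("ISC", "clear"), ("UNLICENSE", "clear"),
   ("0BSD", "clear"), ("CC0-1.0", "clear"), ("ZLIB", "clear"),
   ("BSL-1.0", "clear"), ("PSF-2.0", "clear"), ("PYTHON-2.0", "clear"),
   ("BLUEOAK-1.0.0", "clear"), ("CC-BY-4.0", "clear"),
   ("CC-BY-3.0", "clear"), ("WTFPL", "clear")]

-- _RISK_MAP = dict(_RISK_TABLE)
def pvRiskMap : PySem.Dict String String := PySem.Dict.ofList pvRiskTable

-- Source B: strip, take the first clause for each separator, then one table lookup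
def classify_dep_license_risk_py_alt (spdx : String) : String :=
  let s := PySem.Str.strip spdx
  let s := [" OR ", " AND "].foldl
    (fun s sep =>
      if PySem.Str.isIn sep (PySem.Str.upper s)
      then PySem.Str.strip ((((PySem.Str.split? s sep).getD []).headD ""))
      else s) s
  PySem.Dict.getD pvRiskMap (PySem.Str.upper (PySem.Str.stripChars s "()")) "unknown"

-- ===== PRECONDITION & SPEC =====
def Spec_classify_dep_license_risk_py (spdx : String) (out : String) : Prop := out = classify_dep_license_risk_py_alt spdx
instance (spdx : String) (out : String) : Decidable (Spec_classify_dep_license_risk_py spdx out) := by unfold Spec_classify_dep_license_risk_py; infer_instance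

-- ===== CLAIM (what is proved, stated in full; the proofs are below) =====
def Claim_equal_classify_dep_license_risk_py : Prop := ∀ (spdx : String), Dom_classify_dep_license_risk_py spdx → Spec_classify_dep_license_risk_py spdx (classify_dep_license_risk_py spdx)

-- ===== LEMMAS AND PROOFS =====
-- the 39 keys of pvRiskMap
def pvAllUpper : List String := pvRiskTable.map (·.1)

-- the case-insensitive tail of A, as a function of the uppercased id, equals B's lookup
set_option maxRecDepth 100000 in
set_option maxHeartbeats 2000000 in
lemma pvTail_eq (u : String) :
    (if pvClear.any (fun lic => PySem.Str.upper lic == u) then "clear"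
     else if pvCaution.any (fun lic => PySem.Str.upper lic == u) then "caution"
     else if pvRestricted.any (fun lic => PySem.Str.upper lic == u) then "restricted"
     else "unknown") = PySem.Dict.getD pvRiskMap u "unknown" := by
  by_cases hu : u ∈ pvAllUpper
  · simp only [pvAllUpper, pvRiskTable, List.map, List.mem_cons, List.not_mem_nil, or_false] at hu
    rcases hu with rfl|rfl|rfl|rfl|rfl|rfl|rfl|rfl|rfl|rfl|rfl|rfl|rfl|rfl|rfl|rfl|rfl|rfl|rfl|rfl|rfl|rfl|rfl|rfl|rfl|rfl|rfl|rfl|rfl|rfl|rfl|rfl|rfl|rfl|rfl|rfl|rfl|rfl|rfl <;> decide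
  · have hA : ∀ l : List String, (∀ x ∈ l, PySem.Str.upper x ∈ pvAllUpper) →
        l.any (fun lic => PySem.Str.upper lic == u) = false := by
      intro l hl
      simp only [List.any_eq_false, beq_iff_eq]
      intro x hx h
      exact hu (h ▸ hl x hx)
    rw [hA pvClear (by decide), hA pvCaution (by decide), hA pvRestricted (by decide)]
    simp only [if_false, Bool.false_eq_true]
    have hc : pvRiskMap.contains u = false := by
      have hk : pvRiskMap.keys = pvAllUpper := by decide
      rw [PySem.Dict.contains_eq_decide_mem_keys, hk]
      simp [hu]
    rw [PySem.Dict.getD_of_not_contains _ _ hc]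

-- exact membership in a set implies the case-insensitive loop also matches
lemma pvExact_any (l : List String) (n : String) (h : l.contains n = true) :
    l.any (fun lic => PySem.Str.upper lic == PySem.Str.upper n) = true := by
  simp only [List.contains_eq_mem, decide_eq_true_eq] at h
  simp only [List.any_eq_true, beq_iff_eq]
  exact ⟨n, h, rfl⟩

lemma pvMain_core (n : String) :
    (if pvClear.contains n then "clear"
     else if pvClear.any (fun lic => PySem.Str.upper lic == PySem.Str.upper n) then "clear"
     else if pvCaution.contains n then "caution"
     else if pvCaution.any (fun lic => PySem.Str.upper lic == PySem.Str.upper n) then "caution"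
     else if pvRestricted.contains n then "restricted"
     else if pvRestricted.any (fun lic => PySem.Str.upper lic == PySem.Str.upper n) then "restricted"
     else "unknown") = PySem.Dict.getD pvRiskMap (PySem.Str.upper n) "unknown" := by
  rw [← pvTail_eq]
  by_cases h1 : pvClear.contains n = true
  · simp only [if_pos h1, if_pos (pvExact_any _ _ h1)]
  simp only [if_neg h1]
  by_cases hC : pvClear.any (fun lic => PySem.Str.upper lic == PySem.Str.upper n) = true
  · simp only [if_pos hC]
  simp only [if_neg hC]
  by_cases h2 : pvCaution.contains n = true
  · simp only [if_pos h2, if_pos (pvExact_any _ _ h2)]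
  simp only [if_neg h2]
  by_cases hC2 : pvCaution.any (fun lic => PySem.Str.upper lic == PySem.Str.upper n) = true
  · simp only [if_pos hC2]
  simp only [if_neg hC2]
  by_cases h3 : pvRestricted.contains n = true
  · simp only [if_pos h3, if_pos (pvExact_any _ _ h3)]
  simp only [if_neg h3]

-- B's inlined strip + separator fold is definitionally A's _normalise_spdx
lemma pvAlt_eq (spdx : String) :
    classify_dep_license_risk_py_alt spdx
      = PySem.Dict.getD pvRiskMap (PySem.Str.upper (pvNormalise spdx)) "unknown" := by
  simp only [classify_dep_license_risk_py_alt, pvNormalise, List.foldl]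

-- ===== VERDICT (by name: the statement is the Claim_ definition above) =====
theorem classify_dep_license_risk_py_spec : Claim_equal_classify_dep_license_risk_py := by
  intro spdx _
  show classify_dep_license_risk_py spdx = classify_dep_license_risk_py_alt spdx
  rw [pvAlt_eq]
  exact pvMain_core (pvNormalise spdx)
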